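-- pv_equiv track=rewrite | github.com/HypoxanthineOvO/Hypo-Research | src/hypo_research/writing/fixer.py | _capitalize_core
-- ===== SOURCE A (Python) =====
-- def _capitalize_core(core: str) -> str:
--     pieces = core.split("-")
--     capitalized: list[str] = []
--     for piece in pieces:
--         if not piece:
--             capitalized.append(piece)
--             continue
--         capitalized.append(piece[0].upper() + piece[1:].lower())
--     return "-".join(capitalized)
-- ===== SOURCE B (Python) =====
-- def _capitalize_core(core: str) -> str:
--     out = []
--     start = True
--     for ch in core:
--         if ch == "-":
--             out.append(ch)
--             start = True
--         elif start:
--             out.append(ch.upper())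
--             start = False
--         else:
--             out.append(ch.lower())
--     return "".join(out)
-- ===== Notes on version B (the rewrite author's own statement) =====
-- stated objective: alternative
-- what changed: Replaces splitting on the hyphen, transforming each piece and joining, with a single left-to-right character scan that tracks a piece-start flag and uppercases or lowercases each character in place.
import Mathlib
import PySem

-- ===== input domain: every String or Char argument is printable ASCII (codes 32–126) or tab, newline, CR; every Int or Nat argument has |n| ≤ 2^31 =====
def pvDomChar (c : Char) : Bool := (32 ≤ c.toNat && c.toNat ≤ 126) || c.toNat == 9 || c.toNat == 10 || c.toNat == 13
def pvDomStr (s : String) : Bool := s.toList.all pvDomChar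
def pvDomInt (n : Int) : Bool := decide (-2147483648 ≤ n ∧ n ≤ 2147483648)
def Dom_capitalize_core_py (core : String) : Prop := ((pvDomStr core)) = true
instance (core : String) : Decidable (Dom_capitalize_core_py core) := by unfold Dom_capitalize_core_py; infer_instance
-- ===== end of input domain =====

-- B replaces A's split/transform/join with a single character scan tracking a piece-start flag (alternative decomposition, same cost).

-- ===== PORT A =====
-- A: split on '-', capitalize each nonempty piece (first char upper, rest lower), join with '-'.
def capitalize_core_py (core : String) : String :=
  String.ofList (PySem.Chars.join ['-']
    ((PySem.Chars.splitOn core.toList ['-']).foldl (fun acc piece =>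
      match piece with
      | [] => acc ++ [piece]               -- `if not piece: capitalized.append(piece)`
      | c :: rest => acc ++ [PySem.Chars.upperChar c :: PySem.Chars.lower rest]) []))
      -- `piece[0].upper() + piece[1:].lower()` (exact on the ASCII domain)

-- ===== PORT B =====
def capitalize_core_py_alt (core : String) : String :=
  String.ofList (core.toList.foldl (fun (s : List Char × Bool) ch =>
    if ch == '-' then (s.1 ++ [ch], true)
    else if s.2 then (s.1 ++ [PySem.Chars.upperChar ch], false)
    else (s.1 ++ [PySem.Chars.lowerChar ch], false)) ([], true)).1

-- ===== PRECONDITION & SPEC =====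
def Spec_capitalize_core_py (core : String) (out : String) : Prop := out = capitalize_core_py_alt core
instance (core : String) (out : String) : Decidable (Spec_capitalize_core_py core out) := by unfold Spec_capitalize_core_py; infer_instance

-- ===== CLAIM (what is proved, stated in full; the proofs are below) =====
def Claim_equal_capitalize_core_py : Prop := ∀ (core : String), Dom_capitalize_core_py core → Spec_capitalize_core_py core (capitalize_core_py core)

-- ===== LEMMAS AND PROOFS =====

-- structural split on '-': mySplit pre cs = the pieces of (pre ++ cs) when pre has no '-'
def mySplit (pre : List Char) : List Char → List (List Char)
  | [] => [pre]
  | c :: r => if c = '-' then pre :: mySplit [] r else mySplit (pre ++ [c]) r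

lemma splitOn_go_eq (fuel : Nat) (l cur : List Char) (acc : List (List Char))
    (h : l.length ≤ fuel) :
    PySem.Chars.splitOn.go ['-'] fuel l cur acc = acc.reverse ++ mySplit cur.reverse l := by
  induction fuel generalizing l cur acc with
  | zero =>
    have : l = [] := List.eq_nil_of_length_eq_zero (Nat.le_zero.mp h)
    subst this
    simp [PySem.Chars.splitOn.go, mySplit]
  | succ n ih =>
    cases l with
    | nil => simp [PySem.Chars.splitOn.go, mySplit]
    | cons c rest =>
      rw [PySem.Chars.splitOn.go]
      by_cases hc : c = '-'
      · subst hc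
        have hpre : List.isPrefixOf ['-'] ('-' :: rest) = true := by
          simp [List.isPrefixOf]
        simp only [hpre, if_true, List.length_cons, List.drop_succ_cons, List.length_nil,
          List.drop_zero]
        rw [ih rest [] (cur.reverse :: acc) (by simpa using Nat.lt_succ_iff.mp (by simpa using h))]
        simp [mySplit]
      · have hpre : List.isPrefixOf ['-'] (c :: rest) = false := by
          simp [List.isPrefixOf, List.isPrefixOf_iff_prefix]
          intro h'; exact hc h'.symm
        simp only [hpre, Bool.false_eq_true, if_false]
        rw [ih rest (c :: cur) acc (by simpa using Nat.lt_succ_iff.mp (by simpa using h))]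
        simp [mySplit, hc]

lemma splitOn_eq_mySplit (cs : List Char) :
    PySem.Chars.splitOn cs ['-'] = mySplit [] cs := by
  rw [PySem.Chars.splitOn, splitOn_go_eq cs.length.succ cs [] [] (Nat.le_succ _)]
  simp

-- piece transform of A
def gPiece : List Char → List Char
  | [] => []
  | c :: rest => PySem.Chars.upperChar c :: PySem.Chars.lower rest

lemma foldl_cap_eq_map (pieces : List (List Char)) (acc : List (List Char)) :
    pieces.foldl (fun acc piece =>
      match piece with
      | [] => acc ++ [piece]
      | c :: rest => acc ++ [PySem.Chars.upperChar c :: PySem.Chars.lower rest]) acc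
      = acc ++ pieces.map gPiece := by
  induction pieces generalizing acc with
  | nil => simp
  | cons p ps ih =>
    cases p with
    | nil => rw [List.foldl_cons]; simp only [ih]; simp [gPiece]
    | cons c rest => rw [List.foldl_cons]; simp only [ih]; simp [gPiece]

-- B's scan, front-emitting form
def goB : List Char → Bool → List Char
  | [], _ => []
  | c :: r, st =>
    if c = '-' then '-' :: goB r true
    else if st then PySem.Chars.upperChar c :: goB r false
    else PySem.Chars.lowerChar c :: goB r false

lemma foldlB_eq_goB (cs : List Char) (out : List Char) (st : Bool) :
    (cs.foldl (fun (s : List Char × Bool) ch =>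
      if ch == '-' then (s.1 ++ [ch], true)
      else if s.2 then (s.1 ++ [PySem.Chars.upperChar ch], false)
      else (s.1 ++ [PySem.Chars.lowerChar ch], false)) (out, st)).1 = out ++ goB cs st := by
  induction cs generalizing out st with
  | nil => simp [goB]
  | cons c r ih =>
    rw [List.foldl_cons]
    by_cases hc : c = '-'
    · subst hc
      simp only [BEq.rfl, if_true]
      rw [ih]; simp [goB]
    · have hb : (c == '-') = false := by simp [hc]
      cases st with
      | true =>
        simp only [hb, Bool.false_eq_true, if_false, if_true]
        rw [ih]; simp [goB, hc]
      | false =>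
        simp only [hb, Bool.false_eq_true, if_false]
        rw [ih]; simp [goB, hc]

-- join with single-char separator, structural form
lemma join_hy (x : List Char) (l : List (List Char)) (h : l ≠ []) :
    PySem.Chars.join ['-'] (x :: l) = x ++ '-' :: PySem.Chars.join ['-'] l := by
  cases l with
  | nil => exact absurd rfl h
  | cons y ys =>
    simp [PySem.Chars.join, List.intercalate, List.intersperse]

lemma join_single (x : List Char) : PySem.Chars.join ['-'] [x] = x := by
  simp [PySem.Chars.join, List.intercalate]

lemma mySplit_ne_nil (pre cs : List Char) : mySplit pre cs ≠ [] := by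
  induction cs generalizing pre with
  | nil => simp [mySplit]
  | cons c r ih =>
    by_cases hc : c = '-' <;> simp [mySplit, hc] <;> exact ih _

lemma gPiece_append (p : List Char) (c : Char) (h : p ≠ []) :
    gPiece (p ++ [c]) = gPiece p ++ [PySem.Chars.lowerChar c] := by
  cases p with
  | nil => exact absurd rfl h
  | cons a t => simp [gPiece, PySem.Chars.lower]

-- main correspondence between A's pipeline and B's scan
lemma main_lemma (cs : List Char) :
    (∀ pre, pre ≠ [] →
        PySem.Chars.join ['-'] ((mySplit pre cs).map gPiece) = gPiece pre ++ goB cs false)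
    ∧ PySem.Chars.join ['-'] ((mySplit [] cs).map gPiece) = goB cs true := by
  induction cs with
  | nil =>
    constructor
    · intro pre _; simp [mySplit, join_single, goB]
    · simp [mySplit, join_single, goB, gPiece]
  | cons c r ih =>
    obtain ⟨ihp, ih0⟩ := ih
    by_cases hc : c = '-'
    · subst hc
      constructor
      · intro pre _
        rw [show mySplit pre ('-' :: r) = pre :: mySplit [] r from by simp [mySplit],
          List.map_cons, join_hy _ _ (by simp [mySplit_ne_nil]), ih0]
        simp [goB]
      · rw [show mySplit [] ('-' :: r) = [] :: mySplit [] r from by simp [mySplit],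
          List.map_cons, join_hy _ _ (by simp [mySplit_ne_nil]), ih0]
        simp [goB, gPiece]
    · constructor
      · intro pre hpre
        rw [show mySplit pre (c :: r) = mySplit (pre ++ [c]) r from by simp [mySplit, hc],
          ihp (pre ++ [c]) (by simp), gPiece_append pre c hpre]
        simp [goB, hc]
      · rw [show mySplit [] (c :: r) = mySplit [c] r from by simp [mySplit, hc],
          ihp [c] (by simp)]
        simp [goB, hc, gPiece, PySem.Chars.lower]

-- ===== VERDICT (by name: the statement is the Claim_ definition above) =====
theorem capitalize_core_py_spec : Claim_equal_capitalize_core_py := by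
  intro core _
  unfold Spec_capitalize_core_py capitalize_core_py capitalize_core_py_alt
  rw [splitOn_eq_mySplit, foldl_cap_eq_map, foldlB_eq_goB]
  simp only [List.nil_append]
  rw [(main_lemma core.toList).2]
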